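-- pv_equiv track=rewrite | github.com/judev1/KeyViz | libs/imggen.py | genrule
-- ===== SOURCE A (Python) =====
-- def genrule(text):
--     rule = []
--     for char in text:
--         chars = bin(char)[2:]
--         while len(chars) < 3:
--             chars = "0" + chars
--         rule += [int(char) for char in chars]
--     return rule
-- ===== SOURCE B (Python) =====
-- def genrule(text):
--     rule = []
--     for char in text:
--         bits = []
--         x = char
--         while x:
--             bits.append(x % 2)
--             x //= 2
--         while len(bits) < 3:
--             bits.append(0)
--         bits.reverse()
--         rule.extend(bits)
--     return rule
-- ===== Notes on version B (the rewrite author's own statement) =====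
-- stated objective: alternative
-- what changed: Replaces bin()-string slicing, front-padding of a string and per-character int() parsing with arithmetic bit extraction: a divmod loop builds each byte's bits LSB-first, zeros are appended to length 3, and the list is reversed; no string round-trip.
import Mathlib
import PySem

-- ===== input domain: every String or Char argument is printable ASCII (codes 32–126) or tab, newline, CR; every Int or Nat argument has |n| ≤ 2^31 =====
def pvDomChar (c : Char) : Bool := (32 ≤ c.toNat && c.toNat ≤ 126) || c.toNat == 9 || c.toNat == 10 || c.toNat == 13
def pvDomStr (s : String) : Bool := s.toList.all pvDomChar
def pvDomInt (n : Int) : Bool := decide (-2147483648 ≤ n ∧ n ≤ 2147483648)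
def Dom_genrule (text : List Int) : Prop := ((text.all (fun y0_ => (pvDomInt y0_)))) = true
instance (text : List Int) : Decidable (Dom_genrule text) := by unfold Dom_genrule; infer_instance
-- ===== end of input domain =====

-- B replaces A's bin()-string slicing/padding/int()-parsing with an arithmetic divmod
-- loop building bits LSB-first, appended zero padding, and a reverse (objective: alternative).

-- ===== PORT A =====
-- bin(n)[2:] for n > 0, as a list of '0'/'1' chars, MSB first (hand port, exact for n > 0)
def pvBin (n : Nat) : List Char :=
  if n = 0 then [] else pvBin (n / 2) ++ [if n % 2 = 1 then '1' else '0']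

-- bin(char)[2:] for char ≥ 0 (bin(0)[2:] = "0")
def pvBinStr (n : Int) : List Char := if n = 0 then ['0'] else pvBin n.toNat

-- the `while len(chars) < 3: chars = "0" + chars` loop
def pvPad3 (cs : List Char) : List Char :=
  if cs.length < 3 then pvPad3 ('0' :: cs) else cs
  termination_by 3 - cs.length
  decreasing_by simp; omega

-- int(c) for a '0'/'1' digit character
def pvDig (c : Char) : Int := (c.toNat : Int) - 48

def genrule (text : List Int) : List Int :=
  text.foldl (fun rule char => rule ++ (pvPad3 (pvBinStr char)).map pvDig) []

-- ===== PORT B =====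
-- the `while x: bits.append(x % 2); x //= 2` loop (exact for x ≥ 0)
def pvBitsLSB (x : Nat) : List Int :=
  if x = 0 then [] else (x % 2 : Nat) :: pvBitsLSB (x / 2)

-- the `while len(bits) < 3: bits.append(0)` loop
def pvPadEnd3 (bits : List Int) : List Int :=
  if bits.length < 3 then pvPadEnd3 (bits ++ [0]) else bits
  termination_by 3 - bits.length
  decreasing_by simp; omega

def genrule_alt (text : List Int) : List Int :=
  text.foldl (fun rule char => rule ++ (pvPadEnd3 (pvBitsLSB char.toNat)).reverse) []

-- ===== PRECONDITION & SPEC =====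
-- A raises ValueError on any negative element (bin(-n)[2:] starts with 'b'); Pre_ excludes those.
def Pre_genrule (text : List Int) : Prop := ∀ x ∈ text, 0 ≤ x
instance (text : List Int) : Decidable (Pre_genrule text) := by unfold Pre_genrule; infer_instance
def pvWitness_genrule : List Int := ([0, 5, 255] : List Int)
def Spec_genrule (text : List Int) (out : List Int) : Prop := out = genrule_alt text
instance (text : List Int) (out : List Int) : Decidable (Spec_genrule text out) := by unfold Spec_genrule; infer_instance

-- ===== CLAIM (what is proved, stated in full; the proofs are below) =====
def Claim_equal_genrule : Prop := ∀ (text : List Int), Dom_genrule text → Pre_genrule text → Spec_genrule text (genrule text)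

-- ===== LEMMAS AND PROOFS =====

-- A's front-padding on an Int list (pvPad3 transported through the digit map)
def pvPadI (l : List Int) : List Int :=
  if l.length < 3 then pvPadI (0 :: l) else l
  termination_by 3 - l.length
  decreasing_by simp; omega

theorem pad3_map (cs : List Char) : (pvPad3 cs).map pvDig = pvPadI (cs.map pvDig) := by
  fun_induction pvPad3 cs with
  | case1 cs h ih =>
      rw [pvPadI]
      simp only [List.length_map]
      rw [if_pos h]
      simpa [pvDig] using ih
  | case2 cs h =>
      rw [pvPadI]
      simp only [List.length_map]
      rw [if_neg h]

theorem padEnd_rev (l : List Int) : (pvPadEnd3 l).reverse = pvPadI l.reverse := by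
  fun_induction pvPadEnd3 l with
  | case1 l h ih =>
      rw [ih]
      conv_rhs => rw [pvPadI]
      simp only [List.length_reverse]
      rw [if_pos h]
      simp
  | case2 l h =>
      conv_rhs => rw [pvPadI]
      simp only [List.length_reverse]
      rw [if_neg h]

theorem bin_map (n : Nat) : (pvBin n).map pvDig = (pvBitsLSB n).reverse := by
  induction n using Nat.strong_induction_on with
  | _ n ih =>
    rw [pvBin, pvBitsLSB]
    by_cases h : n = 0
    · simp [h]
    · rw [if_neg h, if_neg h]
      rw [List.map_append, ih (n / 2) (Nat.div_lt_self (Nat.pos_of_ne_zero h) one_lt_two)]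
      simp only [List.reverse_cons, List.map_cons, List.map_nil]
      congr 1
      rcases Nat.mod_two_eq_zero_or_one n with h2 | h2 <;> simp [h2, pvDig]

theorem per_char (c : Int) (hc : 0 ≤ c) :
    (pvPad3 (pvBinStr c)).map pvDig = (pvPadEnd3 (pvBitsLSB c.toNat)).reverse := by
  rw [pad3_map, padEnd_rev, pvBinStr]
  by_cases h : c = 0
  · subst h
    rw [if_pos rfl]
    have : pvBitsLSB (Int.toNat 0) = [] := by rw [pvBitsLSB]; simp
    rw [this]
    conv_rhs => rw [pvPadI]
    congr 1
  · rw [if_neg h, bin_map]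

theorem fold_eq (text : List Int) (h : ∀ x ∈ text, 0 ≤ x) (acc : List Int) :
    text.foldl (fun rule char => rule ++ (pvPad3 (pvBinStr char)).map pvDig) acc =
    text.foldl (fun rule char => rule ++ (pvPadEnd3 (pvBitsLSB char.toNat)).reverse) acc := by
  induction text generalizing acc with
  | nil => rfl
  | cons c t ih =>
      simp only [List.foldl_cons]
      rw [per_char c (h c (List.mem_cons_self))]
      exact ih (fun x hx => h x (List.mem_cons_of_mem _ hx)) _

-- ===== VERDICT (by name: the statement is the Claim_ definition above) =====
theorem genrule_spec : Claim_equal_genrule := by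
  intro text _ hpre
  unfold Spec_genrule genrule genrule_alt
  exact fold_eq text hpre []
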